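-- pv_equiv track=rewrite | github.com/Homiez09/cs112-65-1 | Lab14.3_Final/05.py | abecedarian
-- ===== SOURCE A (Python) =====
-- def abecedarian(word: str):
--     word = str(word).lower()
--     if word == "":
--         return 0
--     result = word[0]
--     for i in range(1,len(word)):
--         if word[i] > result[-1]:
--             result += word[i]
--         elif word[i] == result[-1]:
--             pass
--         else:
--             break
--     count = len(result)
--     return count
-- ===== SOURCE B (Python) =====
-- def abecedarian(word: str):
--     word = str(word).lower()
--     if word == "":
--         return 0
--     j = len(word)
--     for i in range(1, len(word)):
--         if word[i] < word[i - 1]: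
--             j = i
--             break
--     return len(set(word[:j]))
-- ===== Notes on version B (the rewrite author's own statement) =====
-- stated objective: simpler
-- what changed: Replaces A's in-loop string accumulator (append-if-greater, skip-if-equal) with a two-phase structure: first find the boundary of the maximal non-decreasing prefix by comparing adjacent characters, then count its distinct characters with a set.
import Mathlib
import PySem

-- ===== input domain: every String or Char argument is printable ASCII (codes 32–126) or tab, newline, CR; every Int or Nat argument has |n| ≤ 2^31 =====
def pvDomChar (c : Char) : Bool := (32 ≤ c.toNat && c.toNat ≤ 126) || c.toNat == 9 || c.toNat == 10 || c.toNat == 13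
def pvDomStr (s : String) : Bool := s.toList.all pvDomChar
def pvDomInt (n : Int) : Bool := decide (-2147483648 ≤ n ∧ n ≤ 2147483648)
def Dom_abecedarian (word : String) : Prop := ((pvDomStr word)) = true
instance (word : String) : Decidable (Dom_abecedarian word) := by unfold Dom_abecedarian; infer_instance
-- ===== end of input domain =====

-- B replaces A's in-loop accumulator string with a two-phase scan: find the boundary of the
-- non-decreasing prefix, then count its distinct characters with a set (objective: simpler).


-- ===== PORT A =====
-- A's loop: from index 1, append word[i] to result when greater than result[-1],
-- skip when equal, break when smaller.
def pvALoop (w : List Char) (i : Nat) (result : List Char) : List Char :=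
  if h : i < w.length then
    if PySem.List.pyGetD result (-1) ' ' < w[i] then
      pvALoop w (i + 1) (result ++ [w[i]])
    else if w[i] = PySem.List.pyGetD result (-1) ' ' then
      pvALoop w (i + 1) result
    else
      result
  else result
termination_by w.length - i

def abecedarian (word : String) : Int :=
  let w := (PySem.Str.lower word).toList
  if h : w = [] then 0
  else ((pvALoop w 1 [w.head h]).length : Int)

-- ===== PORT B =====
-- B phase 1: first index i ≥ 1 with word[i] < word[i-1], else len(word).
def pvBBound (w : List Char) (i : Nat) : Nat :=
  if h : i < w.length then
    if w[i] < w[i - 1]'(Nat.lt_of_le_of_lt (Nat.sub_le i 1) h) then i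
    else pvBBound w (i + 1)
  else w.length
termination_by w.length - i

def abecedarian_alt (word : String) : Int :=
  let w := (PySem.Str.lower word).toList
  if w = [] then 0
  else ((PySem.Set.ofList (w.take (pvBBound w 1))).length : Int)

-- ===== PRECONDITION & SPEC =====
def Spec_abecedarian (word : String) (out : Int) : Prop := out = abecedarian_alt word
instance (word : String) (out : Int) : Decidable (Spec_abecedarian word out) := by unfold Spec_abecedarian; infer_instance

-- ===== CLAIM (what is proved, stated in full; the proofs are below) =====
def Claim_equal_abecedarian : Prop := ∀ (word : String), Dom_abecedarian word → Spec_abecedarian word (abecedarian word)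

-- ===== LEMMAS AND PROOFS =====

-- Core invariant: if result is exactly set(w[:i]) with all elements ≤ w[i-1] (its last element),
-- then A's loop from index i produces set(w[:j]) where j is B's boundary from index i.
lemma pvLoop_eq (w : List Char) : ∀ n i result (hres : result ≠ []), w.length - i = n → 1 ≤ i → i ≤ w.length →
    (∀ hi : i - 1 < w.length, result.getLast hres = w[i - 1] ∧ ∀ x ∈ result, x ≤ w[i - 1]) →
    result = PySem.Set.ofList (w.take i) →
    pvALoop w i result = PySem.Set.ofList (w.take (pvBBound w i)) := by
  intro n
  induction n using Nat.strong_induction_on with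
  | _ n ih =>
    intro i result hres hn h1 hle hinv hset
    rw [pvALoop, pvBBound]
    by_cases h : i < w.length
    · have hi1 : i - 1 < w.length := Nat.lt_of_le_of_lt (Nat.sub_le i 1) h
      have hlast : PySem.List.pyGetD result (-1) ' ' = w[i - 1] := by
        rw [PySem.List.pyGetD_neg_one result ' ' hres]; exact (hinv hi1).1
      have hub : ∀ x ∈ result, x ≤ w[i - 1] := (hinv hi1).2
      have htake : w.take (i + 1) = w.take i ++ [w[i]] := by
        rw [List.take_add_one, List.getElem?_eq_getElem h]
        rfl
      have hofl : PySem.Set.ofList (w.take (i + 1)) = PySem.Set.add (PySem.Set.ofList (w.take i)) w[i] := by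
        rw [htake, PySem.Set.ofList_eq_foldl, List.foldl_append]
        rfl
      rw [dif_pos h, dif_pos h, hlast]
      rcases lt_trichotomy w[i] (w[i - 1]) with hlt | heq | hgt
      · rw [if_neg (not_lt.mpr hlt.le), if_neg (ne_of_lt hlt), if_pos hlt]
        exact hset
      · rw [if_neg (by simp [heq]), if_pos heq, if_neg (by simp [heq])]
        apply ih (w.length - (i + 1)) (by omega) (i + 1) result hres rfl (by omega) h
        · intro hi'
          have hgoal : i + 1 - 1 = i := by omega
          simp only [hgoal, heq]
          exact ⟨(hinv hi1).1, hub⟩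
        · rw [hofl, ← hset]
          have hmem : w[i] ∈ result := by
            rw [heq, ← (hinv hi1).1]
            exact List.getLast_mem hres
          simp [PySem.Set.add, PySem.Set.contains, List.contains_eq_mem, hmem]
      · rw [if_pos hgt, if_neg (not_lt.mpr hgt.le)]
        apply ih (w.length - (i + 1)) (by omega) (i + 1) (result ++ [w[i]]) (by simp) rfl (by omega) h
        · intro hi'
          have he : i + 1 - 1 = i := by omega
          simp only [he]
          constructor
          · simp
          · intro x hx
            rcases List.mem_append.mp hx with hx | hx
            · exact le_of_lt (lt_of_le_of_lt (hub x hx) hgt)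
            · simp at hx; simp [hx]
        · rw [hofl, ← hset]
          have hnmem : w[i] ∉ result := fun hmem => absurd (hub _ hmem) (not_le.mpr hgt)
          simp [PySem.Set.add, PySem.Set.contains, List.contains_eq_mem, hnmem]
    · rw [dif_neg h, dif_neg h]
      have : i = w.length := by omega
      rw [hset, this, List.take_length]

-- ===== VERDICT (by name: the statement is the Claim_ definition above) =====
theorem abecedarian_spec : Claim_equal_abecedarian := by
  intro word _
  unfold Spec_abecedarian abecedarian abecedarian_alt
  generalize (PySem.Str.lower word).toList = W
  cases W with
  | nil => rfl
  | cons c t =>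
    rw [dif_neg (List.cons_ne_nil c t), if_neg (List.cons_ne_nil c t)]
    simp only [List.head_cons]
    exact congrArg (fun l : List Char => (l.length : Int))
      (pvLoop_eq (c :: t) ((c :: t).length - 1) 1 [c] (by simp) rfl (le_refl 1) (by simp)
        (fun hi => ⟨rfl, by simp⟩) rfl)
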